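-- pv_equiv track=rewrite | github.com/AxtonH/Prezo | backend/app/api/ai.py | find_matching_delimiter
-- ===== SOURCE A (Python) =====
-- def find_matching_delimiter(
--     text: str, opening_index: int, opening_char: str, closing_char: str
-- ) -> int:
--     if opening_index < 0 or opening_index >= len(text):
--         return -1
--     depth = 0
--     mode = "code"
--     index = opening_index
--     while index < len(text):
--         char = text[index]
--         next_char = text[index + 1] if index + 1 < len(text) else ""
--         if mode == "block_comment":
--             if char == "*" and next_char == "/":
--                 mode = "code"
--                 index += 2
--                 continue
--             index += 1
--             continue
--         if mode == "single_quote":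
--             if char == "\\":
--                 index += 2
--                 continue
--             if char == "'":
--                 mode = "code"
--             index += 1
--             continue
--         if mode == "double_quote":
--             if char == "\\":
--                 index += 2
--                 continue
--             if char == '"':
--                 mode = "code"
--             index += 1
--             continue
--
--         if char == "/" and next_char == "*":
--             mode = "block_comment"
--             index += 2
--             continue
--         if char == "'":
--             mode = "single_quote"
--             index += 1
--             continue
--         if char == '"':
--             mode = "double_quote"
--             index += 1
--             continue
--         if char == opening_char:
--             depth += 1
--         elif char == closing_char:
--             depth -= 1
--             if depth == 0:
--                 return index
--         index += 1
--     return -1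
-- ===== SOURCE B (Python) =====
-- def find_matching_delimiter(
--     text: str, opening_index: int, opening_char: str, closing_char: str
-- ) -> int:
--     # Two-pass: first classify positions reachable in "code" mode, then scan
--     # only those positions for depth counting.
--     n = len(text)
--     if opening_index < 0 or opening_index >= n:
--         return -1
--     positions = []
--     i = opening_index
--     mode = 0  # 0 code, 1 block comment, 2 single quote, 3 double quote
--     while i < n:
--         c = text[i]
--         nc = text[i + 1] if i + 1 < n else ""
--         if mode == 1:
--             if c == "*" and nc == "/":
--                 mode = 0
--                 i += 2
--             else:
--                 i += 1
--         elif mode == 2: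
--             if c == "\\":
--                 i += 2
--             else:
--                 if c == "'":
--                     mode = 0
--                 i += 1
--         elif mode == 3:
--             if c == "\\":
--                 i += 2
--             else:
--                 if c == '"':
--                     mode = 0
--                 i += 1
--         else:
--             if c == "/" and nc == "*":
--                 mode = 1
--                 i += 2
--             elif c == "'":
--                 mode = 2
--                 i += 1
--             elif c == '"':
--                 mode = 3
--                 i += 1
--             else:
--                 positions.append(i)
--                 i += 1
--     depth = 0
--     for p in positions:
--         c = text[p]
--         if c == opening_char:
--             depth += 1
--         elif c == closing_char:
--             depth -= 1
--             if depth == 0: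
--                 return p
--     return -1
-- ===== Notes on version B (the rewrite author's own statement) =====
-- stated objective: alternative
-- what changed: A's single interleaved state-machine loop (mode tracking and depth counting mixed) is split into two passes: a classification pass that lists the positions live in code mode, then a simple depth-counting scan over just those positions.
import Mathlib
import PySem

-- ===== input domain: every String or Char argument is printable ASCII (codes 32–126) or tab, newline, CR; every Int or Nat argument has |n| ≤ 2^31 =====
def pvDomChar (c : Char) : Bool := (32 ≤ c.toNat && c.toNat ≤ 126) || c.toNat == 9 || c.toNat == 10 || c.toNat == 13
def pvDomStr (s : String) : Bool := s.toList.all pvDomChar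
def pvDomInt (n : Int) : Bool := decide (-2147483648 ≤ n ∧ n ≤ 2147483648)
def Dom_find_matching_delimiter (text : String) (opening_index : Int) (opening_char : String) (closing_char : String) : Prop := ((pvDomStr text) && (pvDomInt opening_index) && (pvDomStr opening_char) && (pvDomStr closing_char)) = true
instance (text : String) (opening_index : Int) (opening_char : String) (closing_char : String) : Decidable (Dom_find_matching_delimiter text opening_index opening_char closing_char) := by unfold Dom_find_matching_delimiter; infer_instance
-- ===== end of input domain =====

-- B replaces A's single state-machine loop by a classify-then-scan decomposition
-- (first mark the code-mode positions, then count delimiters over that list); objective: alternative.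

-- ===== PORT A =====
-- Python's string-valued mode variable, rendered as an enum
inductive pvMode : Type
  | code | block_comment | single_quote | double_quote
  deriving DecidableEq, Repr

-- A's while loop; state (index, mode, depth); char = cs[index]!, next_char "" ↔ none;
-- one iteration = the bounds check plus the dispatch on mode, exactly A's branch order
def pvLoopA (cs : List Char) (oc cc : String) : Nat → pvMode → Int → Int
  | index, .block_comment, depth =>
    if h : index < cs.length then
      if cs[index]! == '*' && cs[index + 1]? == some '/' then pvLoopA cs oc cc (index + 2) .code depth
      else pvLoopA cs oc cc (index + 1) .block_comment depth
    else -1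
  | index, .single_quote, depth =>
    if h : index < cs.length then
      if cs[index]! == '\\' then pvLoopA cs oc cc (index + 2) .single_quote depth
      else if cs[index]! == '\'' then pvLoopA cs oc cc (index + 1) .code depth
      else pvLoopA cs oc cc (index + 1) .single_quote depth
    else -1
  | index, .double_quote, depth =>
    if h : index < cs.length then
      if cs[index]! == '\\' then pvLoopA cs oc cc (index + 2) .double_quote depth
      else if cs[index]! == '"' then pvLoopA cs oc cc (index + 1) .code depth
      else pvLoopA cs oc cc (index + 1) .double_quote depth
    else -1
  | index, .code, depth =>
    if h : index < cs.length then
      if cs[index]! == '/' && cs[index + 1]? == some '*' then pvLoopA cs oc cc (index + 2) .block_comment depth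
      else if cs[index]! == '\'' then pvLoopA cs oc cc (index + 1) .single_quote depth
      else if cs[index]! == '"' then pvLoopA cs oc cc (index + 1) .double_quote depth
      else if String.ofList [cs[index]!] == oc then pvLoopA cs oc cc (index + 1) .code (depth + 1)
      else if String.ofList [cs[index]!] == cc then
        (if depth - 1 == 0 then (index : Int) else pvLoopA cs oc cc (index + 1) .code (depth - 1))
      else pvLoopA cs oc cc (index + 1) .code depth
    else -1
termination_by index _ _ => cs.length - index
decreasing_by all_goals omega

def find_matching_delimiter (text : String) (opening_index : Int) (opening_char : String) (closing_char : String) : Int :=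
  if opening_index < 0 || opening_index ≥ (text.toList.length : Int) then -1
  else pvLoopA text.toList opening_char closing_char opening_index.toNat .code 0

-- ===== PORT B =====
-- pass 1 of Source B: the positions processed in code mode without triggering a transition
def pvClassifyB (cs : List Char) : Nat → pvMode → List Nat
  | i, .block_comment =>
    if h : i < cs.length then
      if cs[i]! == '*' && cs[i + 1]? == some '/' then pvClassifyB cs (i + 2) .code
      else pvClassifyB cs (i + 1) .block_comment
    else []
  | i, .single_quote =>
    if h : i < cs.length then
      if cs[i]! == '\\' then pvClassifyB cs (i + 2) .single_quote
      else if cs[i]! == '\'' then pvClassifyB cs (i + 1) .code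
      else pvClassifyB cs (i + 1) .single_quote
    else []
  | i, .double_quote =>
    if h : i < cs.length then
      if cs[i]! == '\\' then pvClassifyB cs (i + 2) .double_quote
      else if cs[i]! == '"' then pvClassifyB cs (i + 1) .code
      else pvClassifyB cs (i + 1) .double_quote
    else []
  | i, .code =>
    if h : i < cs.length then
      if cs[i]! == '/' && cs[i + 1]? == some '*' then pvClassifyB cs (i + 2) .block_comment
      else if cs[i]! == '\'' then pvClassifyB cs (i + 1) .single_quote
      else if cs[i]! == '"' then pvClassifyB cs (i + 1) .double_quote
      else i :: pvClassifyB cs (i + 1) .code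
    else []
termination_by i _ => cs.length - i
decreasing_by all_goals omega

-- pass 2 of Source B: depth counting over the code positions
def pvScanB (cs : List Char) (oc cc : String) : List Nat → Int → Int
  | [], _ => -1
  | p :: rest, depth =>
    if String.ofList [cs[p]!] == oc then pvScanB cs oc cc rest (depth + 1)
    else if String.ofList [cs[p]!] == cc then
      (if depth - 1 == 0 then (p : Int) else pvScanB cs oc cc rest (depth - 1))
    else pvScanB cs oc cc rest depth

def find_matching_delimiter_alt (text : String) (opening_index : Int) (opening_char : String) (closing_char : String) : Int :=
  if opening_index < 0 || opening_index ≥ (text.toList.length : Int) then -1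
  else pvScanB text.toList opening_char closing_char
        (pvClassifyB text.toList opening_index.toNat .code) 0

-- ===== PRECONDITION & SPEC =====
def Spec_find_matching_delimiter (text : String) (opening_index : Int) (opening_char : String) (closing_char : String) (out : Int) : Prop := out = find_matching_delimiter_alt text opening_index opening_char closing_char
instance (text : String) (opening_index : Int) (opening_char : String) (closing_char : String) (out : Int) : Decidable (Spec_find_matching_delimiter text opening_index opening_char closing_char out) := by unfold Spec_find_matching_delimiter; infer_instance

-- ===== CLAIM (what is proved, stated in full; the proofs are below) =====
def Claim_equal_find_matching_delimiter : Prop := ∀ (text : String) (opening_index : Int) (opening_char : String) (closing_char : String), Dom_find_matching_delimiter text opening_index opening_char closing_char → Spec_find_matching_delimiter text opening_index opening_char closing_char (find_matching_delimiter text opening_index opening_char closing_char)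

-- ===== LEMMAS AND PROOFS =====

-- A's loop equals B's scan over B's classification, for every start state
theorem pvLoopA_eq_scan (cs : List Char) (oc cc : String) :
    ∀ (n i : Nat) (mode : pvMode) (depth : Int), cs.length - i ≤ n →
      pvLoopA cs oc cc i mode depth = pvScanB cs oc cc (pvClassifyB cs i mode) depth := by
  intro n
  induction n with
  | zero =>
    intro i mode depth hn
    have hi : ¬ i < cs.length := by omega
    cases mode <;> (rw [pvLoopA, pvClassifyB, dif_neg hi, dif_neg hi]; rfl)
  | succ n ih =>
    intro i mode depth hn
    by_cases hi : i < cs.length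
    · cases mode
      -- code
      · rw [pvLoopA, pvClassifyB, dif_pos hi, dif_pos hi]
        split_ifs with h1 h2 h3 h4 h5 h6
        · exact ih _ _ _ (by omega)
        · exact ih _ _ _ (by omega)
        · exact ih _ _ _ (by omega)
        · rw [pvScanB, if_pos h4]; exact ih _ _ _ (by omega)
        · rw [pvScanB, if_neg h4, if_pos h5, if_pos h6]
        · rw [pvScanB, if_neg h4, if_pos h5, if_neg h6]; exact ih _ _ _ (by omega)
        · rw [pvScanB, if_neg h4, if_neg h5]; exact ih _ _ _ (by omega)
      -- block_comment / single_quote / double_quote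
      all_goals
        rw [pvLoopA, pvClassifyB, dif_pos hi, dif_pos hi]
      all_goals split_ifs <;> exact ih _ _ _ (by omega)
    · cases mode <;> (rw [pvLoopA, pvClassifyB, dif_neg hi, dif_neg hi]; rfl)

-- ===== VERDICT (by name: the statement is the Claim_ definition above) =====
theorem find_matching_delimiter_spec : Claim_equal_find_matching_delimiter := by
  unfold Claim_equal_find_matching_delimiter Spec_find_matching_delimiter
  intro text oi oc cc _
  unfold find_matching_delimiter find_matching_delimiter_alt
  split_ifs with h
  · rfl
  · exact pvLoopA_eq_scan text.toList oc cc _ _ .code 0 (le_refl _)
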